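-- pv_equiv track=rewrite | github.com/Darshan-D/DSA_IB | Hashing/an_increment_problem.py | solve
-- ===== SOURCE A (Python) =====
-- def solve(A):
--     hash_map = {}
--
--     # Start iterating through each number
--     for i,num in enumerate(A):
--
--         # If num not in hash_map then store it as key,
--         # with value being the list containing the indexes
--         # where that num is present
--         if num not in hash_map:
--             hash_map[num] = [i]
--
--         else:
--             # If it is in the hash_map, check if value list is empty or not
--             if len(hash_map[num]) > 0:
--                 # If not empty, then take the index of first occurece ..it will always be on pos 0,
--                 # since we will sort the indexes, whenever we add them in the list
--                 first_occ_idx = hash_map[num][0]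
--
--                 # remove this index from the list
--                 hash_map[num] = hash_map[num][1:]
--
--                 # Increase its value by 1
--                 A[first_occ_idx] += 1
--
--                 # If the new number after increment is not in the hash_map, add it
--                 if A[first_occ_idx] not in hash_map:
--                     hash_map[A[first_occ_idx]] = [first_occ_idx]
--
--                 # If it is present, add the new index to its list of indexes
--                 else:
--                     hash_map[A[first_occ_idx]].append(first_occ_idx)
--
--                     # Also sort that indexes out, since we need the first_occ_idx,
--                     # we need it to be on the pos 0, hence sort
--                     hash_map[A[first_occ_idx]].sort()
--
--                 # Adding the current index to the element
--                 hash_map[num].append(i)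
--
--             # If num exists in the dic, but not in the actual arr apart from current idx,
--             # then add current idx to the hash_map
--             else:
--                 hash_map[num] = [i]
--
--     # return the original list
--     return A
-- ===== SOURCE B (Python) =====
-- def solve(A):
--     # Mutates A in place (like the original) and returns it.
--     # No hash map at all: for each position i, scan the prefix for the
--     # earliest index that currently holds the same value and bump it.
--     for i in range(len(A)):
--         num = A[i]
--         for j in range(i):
--             if A[j] == num:
--                 A[j] += 1
--                 break
--     return A
-- ===== Notes on version B (the rewrite author's own statement) =====
-- stated objective: simpler
-- what changed: A maintains a hash map from value to sorted lists of indices (kept ordered by slicing, appending and re-sorting); B drops the hash map entirely: for each position it linearly scans the prefix for the earliest index currently holding the same value and bumps it.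
import Mathlib
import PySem

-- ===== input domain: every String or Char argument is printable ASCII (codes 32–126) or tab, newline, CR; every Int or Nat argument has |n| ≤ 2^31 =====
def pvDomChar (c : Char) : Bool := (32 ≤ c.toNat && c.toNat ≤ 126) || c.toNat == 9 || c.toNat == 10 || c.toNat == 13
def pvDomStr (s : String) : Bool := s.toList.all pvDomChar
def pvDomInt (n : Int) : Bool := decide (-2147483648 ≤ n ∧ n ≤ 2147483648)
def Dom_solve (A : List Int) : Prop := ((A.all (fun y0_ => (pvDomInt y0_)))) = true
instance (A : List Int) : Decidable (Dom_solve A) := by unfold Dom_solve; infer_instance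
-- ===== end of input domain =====

-- B replaces A's hash map of value → sorted index lists with a direct prefix scan
-- (find the earliest earlier index currently holding the same value and bump it) —
-- objective: simpler. Both Pythons mutate the argument list in place and return it;
-- the equivalence proved here is about the RETURN value (B mutates the same way).

-- ===== PORT A =====
-- one iteration of A's loop; state = (current list, hash_map); i is the enumerate index.
-- A[first_occ_idx] += 1 is ported with pySetD/pyGetD (indices stored in hash_map are always
-- in range, so the defaults are never used); hash_map[num][1:] is PySem.List.slice.
def stepA (s : List Int × PySem.Dict Int (List Int)) (i : Nat) :
    List Int × PySem.Dict Int (List Int) :=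
  let arr := s.1
  let d := s.2
  let num := PySem.List.pyGetD arr (i : Int) 0
  if d.contains num = false then
    (arr, d.insert num [(i : Int)])
  else
    let l := d.getD num []
    if 0 < l.length then
      let j := PySem.List.pyGetD l 0 0
      let d1 := d.insert num (PySem.List.slice l (some 1) none)
      let arr1 := PySem.List.pySetD arr j (PySem.List.pyGetD arr j 0 + 1)
      let v := PySem.List.pyGetD arr1 j 0
      let d2 :=
        if d1.contains v = false then d1.insert v [j]
        else (d1.modify v [] (fun lv => lv ++ [j])).modify v []
               (fun lv => PySem.List.sorted lv (fun x => x))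
      (arr1, d2.modify num [] (fun ln => ln ++ [(i : Int)]))
    else (arr, d.insert num [(i : Int)])

def solve (A : List Int) : List Int :=
  ((List.range A.length).foldl stepA (A, PySem.Dict.empty)).1

-- ===== PORT B =====
-- one iteration of B's loop: the inner 'for j in range(i): if A[j] == num: A[j] += 1; break'
-- is List.find? over List.range i (first index satisfying the test, then one update).
def stepB (arr : List Int) (i : Nat) : List Int :=
  let num := PySem.List.pyGetD arr (i : Int) 0
  match (List.range i).find? (fun (j : Nat) => PySem.List.pyGetD arr (j : Int) 0 == num) with
  | some j => PySem.List.pySetD arr (j : Int) (PySem.List.pyGetD arr (j : Int) 0 + 1)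
  | none => arr

def solve_alt (A : List Int) : List Int :=
  (List.range A.length).foldl stepB A

-- ===== PRECONDITION & SPEC =====
def Spec_solve (A : List Int) (out : List Int) : Prop := out = solve_alt A
instance (A : List Int) (out : List Int) : Decidable (Spec_solve A out) := by unfold Spec_solve; infer_instance

-- ===== CLAIM (what is proved, stated in full; the proofs are below) =====
def Claim_equal_solve : Prop := ∀ (A : List Int), Dom_solve A → Spec_solve A (solve A)

-- ===== LEMMAS AND PROOFS =====

-- the (sorted, increasing) list of indices j < i whose current value is v
def idxs (arr : List Int) (i : Nat) (v : Int) : List Int :=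
  ((List.range i).filter (fun j => arr.getD j 0 == v)).map (fun (j : Nat) => (j : Int))

-- invariant tying A's hash_map to the current array prefix: the bag of a value v is
-- exactly the increasing list of earlier indices currently holding v (absent iff empty)
def InvD (arr : List Int) (d : PySem.Dict Int (List Int)) (i : Nat) : Prop :=
  ∀ v : Int, d.get? v = if idxs arr i v = [] then none else some (idxs arr i v)

lemma find?_eq_head?_filter (l : List Nat) (p : Nat → Bool) :
    l.find? p = (l.filter p).head? := by
  induction l with
  | nil => rfl
  | cons a l ih =>
    by_cases h : p a
    · rw [List.find?_cons_of_pos h, List.filter_cons_of_pos h, List.head?_cons]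
    · rw [List.find?_cons_of_neg h, List.filter_cons_of_neg h, ih]

lemma filter_drop_j {l : List Nat} (hn : l.Nodup) {p q : Nat → Bool} {j : Nat} {t : List Nat}
    (hq : ∀ k, k ≠ j → q k = p k) (hqj : q j = false) (hf : l.filter p = j :: t) :
    l.filter q = t := by
  induction l with
  | nil => simp at hf
  | cons a l ih =>
    rcases List.nodup_cons.mp hn with ⟨ha, hn'⟩
    by_cases pa : p a = true
    · rw [List.filter_cons_of_pos pa] at hf
      obtain ⟨rfl, hft⟩ : a = j ∧ l.filter p = t := ⟨(List.cons_eq_cons.mp hf).1, (List.cons_eq_cons.mp hf).2⟩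
      rw [List.filter_cons_of_neg (by simp [hqj]), List.filter_congr (fun k hk => hq k (by rintro rfl; exact ha hk))]
      exact hft
    · rw [List.filter_cons_of_neg (by simpa using pa)] at hf
      have haj : a ≠ j := by
        rintro rfl
        exact ha (List.mem_of_mem_filter (hf ▸ (List.mem_cons_self : a ∈ a :: t)))
      rw [List.filter_cons_of_neg (by simp [hq a haj, pa])]
      exact ih hn' hf

lemma filter_add_j {l : List Nat} (hn : l.Nodup) {p q : Nat → Bool} {j : Nat}
    (hq : ∀ k, k ≠ j → q k = p k) (hqj : q j = true) (hpj : p j = false) (hj : j ∈ l) :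
    (l.filter q).Perm (j :: l.filter p) := by
  induction l with
  | nil => simp at hj
  | cons a l ih =>
    rcases List.nodup_cons.mp hn with ⟨ha, hn'⟩
    by_cases haj : a = j
    · subst haj
      rw [List.filter_cons_of_pos hqj, List.filter_cons_of_neg (by simp [hpj]),
          List.filter_congr (fun k hk => hq k (by rintro rfl; exact ha hk))]
    · have hjl : j ∈ l := by
        rcases List.mem_cons.mp hj with h | h
        · exact absurd h.symm haj
        · exact h
      have hqa : q a = p a := hq a haj
      by_cases pa : p a = true
      · rw [List.filter_cons_of_pos (hqa ▸ pa), List.filter_cons_of_pos pa]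
        exact ((ih hn' hjl).cons a).trans (List.Perm.swap j a _)
      · rw [List.filter_cons_of_neg (by simp [hqa, pa]), List.filter_cons_of_neg (by simpa using pa)]
        exact ih hn' hjl

lemma getD_set_eq {arr : List Int} {j : Nat} (h : j < arr.length) (w : Int) (k : Nat) :
    (arr.set j w).getD k 0 = if k = j then w else arr.getD k 0 := by
  by_cases hk : k = j
  · subst hk
    simp [List.getD_eq_getElem?_getD, h]
  · simp [List.getD_eq_getElem?_getD, List.getElem?_set_ne (by omega : j ≠ k), hk]

lemma idxs_succ (arr : List Int) (i : Nat) (v : Int) :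
    idxs arr (i + 1) v
      = idxs arr i v ++ (if arr.getD i 0 == v then [(i : Int)] else []) := by
  unfold idxs
  rw [List.range_succ, List.filter_append, List.map_append]
  rcases h : (arr.getD i 0 == v) with _ | _ <;>
    rw [List.getD_eq_getElem?_getD] at h <;>
    simp [h]

lemma filter_map_pairwise (i : Nat) (q : Nat → Bool) :
    ((((List.range i).filter q)).map (fun (j : Nat) => (j : Int))).Pairwise (· ≤ ·) := by
  refine List.Pairwise.map _ (fun a b hab => ?_) ((List.pairwise_lt_range (n := i)).filter _)
  exact_mod_cast le_of_lt hab

lemma modify_eq_insert (d : PySem.Dict Int (List Int)) (k : Int) (d0 : List Int)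
    (f : List Int → List Int) : d.modify k d0 f = d.insert k (f (d.getD k d0)) :=
  PySem.Dict.ext_iff.mpr rfl

lemma getD_of_get?_eq_some {d : PySem.Dict Int (List Int)} {k : Int} {l : List Int}
    (h : d.get? k = some l) : d.getD k [] = l := by
  rw [PySem.Dict.getD_eq_get?_getD, h]; rfl

-- one iteration: same new array, and the invariant is preserved by A's new dict
lemma step_ok (i : Nat) (arr : List Int) (d : PySem.Dict Int (List Int))
    (hlen : i < arr.length) (hInv : InvD arr d i) :
    (stepA (arr, d) i).1 = stepB arr i ∧ InvD (stepB arr i) (stepA (arr, d) i).2 (i + 1) := by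
  have hnum : PySem.List.pyGetD arr (i : Int) 0 = arr.getD i 0 := by simp
  set num := arr.getD i 0 with hnumdef
  have hpredB : (fun (j : Nat) => PySem.List.pyGetD arr (j : Int) 0 == num)
      = (fun (j : Nat) => arr.getD j 0 == num) := by funext j; simp
  rcases hfil : (List.range i).filter (fun j => arr.getD j 0 == num) with _ | ⟨j, t⟩
  · -- no earlier index currently holds num
    have hB : stepB arr i = arr := by
      simp only [stepB]
      rw [hnum, hpredB, find?_eq_head?_filter, hfil]
      rfl
    have hidx : idxs arr i num = [] := by unfold idxs; rw [hfil]; rfl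
    have hget : d.get? num = none := by rw [hInv num, hidx]; rfl
    have hcon : d.contains num = false :=
      (PySem.Dict.get?_eq_none_iff_contains d num).mp hget
    rw [hB]
    simp only [stepA]
    rw [hnum, hcon, if_pos rfl]
    refine ⟨rfl, fun v => ?_⟩
    rw [PySem.Dict.get?_insert]
    by_cases hv : v = num
    · subst hv
      rw [if_pos rfl, idxs_succ, ← hnumdef, hidx, beq_self_eq_true, if_pos rfl]
      rfl
    · rw [if_neg hv, hInv v, idxs_succ, ← hnumdef,
          beq_eq_false_iff_ne.mpr (fun h => hv h.symm), if_neg Bool.false_ne_true, List.append_nil]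
  · -- earliest such index is j
    have hjmem : j ∈ (List.range i).filter (fun j => arr.getD j 0 == num) := by
      rw [hfil]; exact List.mem_cons_self
    have hjr : j < i := List.mem_range.mp (List.mem_of_mem_filter hjmem)
    have hjlen : j < arr.length := lt_trans hjr hlen
    have hvj : arr.getD j 0 = num := eq_of_beq (List.mem_filter.mp hjmem).2
    have hB : stepB arr i = arr.set j (num + 1) := by
      simp only [stepB]
      rw [hnum, hpredB, find?_eq_head?_filter, hfil, List.head?_cons]
      simp only [PySem.List.pySetD_natCast, PySem.List.pyGetD_natCast]
      rw [hvj]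
    have hidx : idxs arr i num = (j : Int) :: t.map (fun (k : Nat) => (k : Int)) := by
      unfold idxs; rw [hfil]; rfl
    have hget : d.get? num = some ((j : Int) :: t.map (fun (k : Nat) => (k : Int))) := by
      rw [hInv num, hidx]; simp
    have hcon : d.contains num = true := by
      rcases hc : d.contains num with _ | _
      · rw [(PySem.Dict.get?_eq_none_iff_contains d num).mpr hc] at hget; cases hget
      · rfl
    have hgd : d.getD num [] = (j : Int) :: t.map (fun (k : Nat) => (k : Int)) :=
      getD_of_get?_eq_some hget
    rw [hB]
    simp only [stepA]
    rw [hnum, hcon, if_neg (by simp), hgd, if_pos (by simp),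
        PySem.List.pyGetD_zero_cons, PySem.List.slice_from_one, List.tail_cons]
    have harr1 : PySem.List.pySetD arr ((j : Nat) : Int)
        (PySem.List.pyGetD arr ((j : Nat) : Int) 0 + 1) = arr.set j (num + 1) := by
      simp only [PySem.List.pySetD_natCast, PySem.List.pyGetD_natCast]
      rw [hvj]
    rw [harr1]
    set arr1 := arr.set j (num + 1) with harr1def
    have hlen1 : arr1.length = arr.length := by rw [harr1def]; simp
    have hgetv : PySem.List.pyGetD arr1 ((j : Nat) : Int) 0 = num + 1 := by
      rw [harr1def]
      simp only [PySem.List.pyGetD_natCast]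
      rw [getD_set_eq hjlen, if_pos rfl]
    rw [hgetv]
    have hvne : (num + 1 : Int) ≠ num := by omega
    have hq : ∀ (w : Int) (k : Nat),
        (arr1.getD k 0 == w) = if k = j then ((num + 1 : Int) == w) else (arr.getD k 0 == w) := by
      intro w k
      rw [harr1def, getD_set_eq hjlen]
      by_cases hk : k = j <;> simp [hk]
    have hvi : arr1.getD i 0 = num := by
      rw [harr1def, getD_set_eq hjlen, if_neg (by omega)]
    -- bag of num after this iteration: drop j, append i
    have hfilnum : (List.range i).filter (fun k => arr1.getD k 0 == num) = t :=
      filter_drop_j List.nodup_range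
        (fun k hk => by rw [hq num k, if_neg hk])
        (by rw [hq num j, if_pos rfl]; exact beq_eq_false_iff_ne.mpr hvne) hfil
    have hidx1num : idxs arr1 (i + 1) num
        = t.map (fun (k : Nat) => (k : Int)) ++ [(i : Int)] := by
      rw [idxs_succ, hvi, beq_self_eq_true, if_pos rfl]
      unfold idxs
      rw [hfilnum]
    -- bag of num+1 after this iteration: insert j (as a permutation)
    have hperm : ((List.range i).filter (fun k => arr1.getD k 0 == (num + 1))).Perm
        (j :: (List.range i).filter (fun k => arr.getD k 0 == (num + 1))) :=
      filter_add_j List.nodup_range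
        (fun k hk => by rw [hq (num + 1) k, if_neg hk])
        (by rw [hq (num + 1) j, if_pos rfl]; exact beq_self_eq_true _)
        (by rw [hvj]; exact beq_eq_false_iff_ne.mpr (by omega))
        (List.mem_range.mpr hjr)
    have hidx1v : idxs arr1 (i + 1) (num + 1)
        = ((List.range i).filter (fun k => arr1.getD k 0 == (num + 1))).map
            (fun (k : Nat) => (k : Int)) := by
      rw [idxs_succ, hvi, beq_eq_false_iff_ne.mpr (by omega), if_neg Bool.false_ne_true,
          List.append_nil]
      rfl
    -- unchanged bags
    have hidx1other : ∀ w : Int, w ≠ num → w ≠ num + 1 →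
        idxs arr1 (i + 1) w = idxs arr i w := by
      intro w hw hw2
      rw [idxs_succ, hvi, beq_eq_false_iff_ne.mpr (fun h => hw h.symm), if_neg Bool.false_ne_true,
          List.append_nil]
      unfold idxs
      congr 1
      refine List.filter_congr (fun k hk => ?_)
      show (arr1.getD k 0 == w) = (arr.getD k 0 == w)
      rw [hq w k]
      by_cases hkj : k = j
      · subst hkj
        rw [if_pos rfl, hvj]
        exact (beq_eq_false_iff_ne.mpr (fun h => hw2 h.symm)).trans
          (beq_eq_false_iff_ne.mpr (fun h => hw h.symm)).symm
      · rw [if_neg hkj]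
    have hd1 : ∀ w : Int, w ≠ num →
        ((d.insert num (t.map (fun (k : Nat) => (k : Int)))).get? w) = d.get? w := by
      intro w hw
      rw [PySem.Dict.get?_insert, if_neg hw]
    rcases hbase : (List.range i).filter (fun k => arr.getD k 0 == (num + 1)) with _ | ⟨b, bs⟩
    · -- num+1 has no earlier occurrence: fresh key [j]
      have hlv : idxs arr i (num + 1) = [] := by unfold idxs; rw [hbase]; rfl
      have hg1 : (d.insert num (t.map (fun (k : Nat) => (k : Int)))).get? (num + 1) = none := by
        rw [hd1 _ hvne, hInv (num + 1), hlv]; rfl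
      have hc1 : (d.insert num (t.map (fun (k : Nat) => (k : Int)))).contains (num + 1) = false :=
        (PySem.Dict.get?_eq_none_iff_contains _ _).mp hg1
      rw [hc1, if_pos rfl]
      refine ⟨rfl, fun w => ?_⟩
      rw [modify_eq_insert, PySem.Dict.get?_insert]
      have hgdnum : ((d.insert num (t.map (fun (k : Nat) => (k : Int)))).insert (num + 1)
          [((j : Nat) : Int)]).getD num [] = t.map (fun (k : Nat) => (k : Int)) := by
        rw [PySem.Dict.getD_eq_get?_getD, PySem.Dict.get?_insert, if_neg (fun h => hvne h.symm),
            PySem.Dict.get?_insert, if_pos rfl]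
        rfl
      by_cases hw : w = num
      · subst hw
        rw [if_pos rfl, hgdnum, hidx1num, if_neg (by simp)]
      · rw [if_neg hw, PySem.Dict.get?_insert]
        by_cases hw2 : w = num + 1
        · subst hw2
          rw [if_pos rfl]
          have hone : idxs arr1 (i + 1) (num + 1) = [((j : Nat) : Int)] := by
            rw [hidx1v]
            rw [hbase] at hperm
            rw [List.perm_singleton.mp hperm]
            rfl
          rw [hone, if_neg (by simp)]
        · rw [if_neg hw2, PySem.Dict.get?_insert, if_neg hw, hInv w,
              hidx1other w hw hw2]
    · -- num+1 already occurs: append j and re-sort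
      have hlv : idxs arr i (num + 1)
          = (b : Int) :: bs.map (fun (k : Nat) => (k : Int)) := by unfold idxs; rw [hbase]; rfl
      have hg1 : (d.insert num (t.map (fun (k : Nat) => (k : Int)))).get? (num + 1)
          = some ((b : Int) :: bs.map (fun (k : Nat) => (k : Int))) := by
        rw [hd1 _ hvne, hInv (num + 1), hlv]; simp
      have hc1 : (d.insert num (t.map (fun (k : Nat) => (k : Int)))).contains (num + 1) = true := by
        rcases hc : (d.insert num (t.map (fun (k : Nat) => (k : Int)))).contains (num + 1) with _ | _
        · rw [(PySem.Dict.get?_eq_none_iff_contains _ _).mpr hc] at hg1; cases hg1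
        · rfl
      rw [hc1, if_neg (by simp)]
      simp only [modify_eq_insert, getD_of_get?_eq_some hg1, PySem.Dict.getD_insert,
        eq_self_iff_true, if_true,
        eq_false (show ¬(num = num + 1) from fun h => hvne h.symm), if_false,
        PySem.Dict.insert_insert_self]
      have hsorted : PySem.List.sorted
          ((((b : Int) :: bs.map (fun (k : Nat) => (k : Int))) ++ [((j : Nat) : Int)]))
          (fun x => x) = idxs arr1 (i + 1) (num + 1) := by
        apply PySem.List.sorted_id_eq_of_perm_of_pairwise
        · rw [hidx1v]
          refine ((List.Perm.map (fun (k : Nat) => (k : Int)) hperm).trans ?_)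
          rw [hbase, List.map_cons]
          exact (List.perm_append_singleton _ _).symm
        · rw [hidx1v]
          exact filter_map_pairwise _ _
      have hne : idxs arr1 (i + 1) (num + 1) ≠ [] := by
        rw [hidx1v]
        intro h
        rw [List.map_eq_nil_iff.mp h] at hperm
        exact absurd hperm.length_eq (by simp)
      refine ⟨by trivial, fun w => ?_⟩
      rw [PySem.Dict.get?_insert]
      by_cases hw : w = num
      · subst hw
        rw [if_pos rfl, hidx1num, if_neg (by simp)]
      · rw [if_neg hw, PySem.Dict.get?_insert]
        by_cases hw2 : w = num + 1
        · subst hw2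
          rw [if_pos rfl, hsorted, if_neg hne]
        · rw [if_neg hw2, PySem.Dict.get?_insert, if_neg hw, hInv w,
              hidx1other w hw hw2]

lemma length_stepB (arr : List Int) (i : Nat) : (stepB arr i).length = arr.length := by
  simp only [stepB]
  split <;> simp

lemma loop_ok (n : Nat) : ∀ (st : Nat) (arr : List Int) (d : PySem.Dict Int (List Int)),
    st + n ≤ arr.length → InvD arr d st →
    ((List.range' st n).foldl stepA (arr, d)).1 = (List.range' st n).foldl stepB arr := by
  induction n with
  | zero => intros; rfl
  | succ n ih =>
    intro st arr d hle hInv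
    rw [List.range'_succ, List.foldl_cons, List.foldl_cons]
    obtain ⟨h1, h2⟩ := step_ok st arr d (by omega) hInv
    rw [show stepA (arr, d) st = ((stepA (arr, d) st).1, (stepA (arr, d) st).2) from rfl, h1]
    exact ih (st + 1) _ _ (by rw [length_stepB]; omega) h2

-- ===== VERDICT (by name: the statement is the Claim_ definition above) =====
theorem solve_spec : Claim_equal_solve := by
  intro A _
  unfold Spec_solve solve solve_alt
  rw [List.range_eq_range']
  exact loop_ok A.length 0 A _ (by omega)
    (fun v => by simp [PySem.Dict.get?_empty, idxs])
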